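-- pv_equiv track=rewrite | github.com/amrithaAmarnath/PythonWorks | pythagorianTriplets.py | pythagorean_triplets_count
-- ===== SOURCE A (Python) =====
-- def pythagorean_triplets_count(arr):
--     sq = [x ** 2 for x in arr]
--     count = 0
--     for i in range(len(sq)):
--         for j in range(i + 1, len(sq)):
--
--             if (sq[i] + sq[j]) in sq:
--                 count += 1
--
--     return count
-- ===== SOURCE B (Python) =====
-- def pythagorean_triplets_count(arr):
--     cnt = {}
--     for x in arr:
--         v = x * x
--         cnt[v] = cnt.get(v, 0) + 1
--     rest = list(cnt)
--     total = 0
--     while rest: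
--         a = rest.pop(0)
--         ca = cnt[a]
--         if a + a in cnt:
--             total += ca * (ca - 1) // 2
--         for b in rest:
--             if a + b in cnt:
--                 total += ca * cnt[b]
--     return total
-- ===== Notes on version B (the rewrite author's own statement) =====
-- stated objective: faster
-- what changed: A scans all O(n^2) index pairs and tests each squared sum by a linear membership scan of the list; B builds a dict counting the squared values in one pass and then combines only pairs of distinct square values multiplicatively (c_a*c_b, and C(c_a,2) for a value paired with itself), with O(1) dict membership tests.
import Mathlib
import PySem

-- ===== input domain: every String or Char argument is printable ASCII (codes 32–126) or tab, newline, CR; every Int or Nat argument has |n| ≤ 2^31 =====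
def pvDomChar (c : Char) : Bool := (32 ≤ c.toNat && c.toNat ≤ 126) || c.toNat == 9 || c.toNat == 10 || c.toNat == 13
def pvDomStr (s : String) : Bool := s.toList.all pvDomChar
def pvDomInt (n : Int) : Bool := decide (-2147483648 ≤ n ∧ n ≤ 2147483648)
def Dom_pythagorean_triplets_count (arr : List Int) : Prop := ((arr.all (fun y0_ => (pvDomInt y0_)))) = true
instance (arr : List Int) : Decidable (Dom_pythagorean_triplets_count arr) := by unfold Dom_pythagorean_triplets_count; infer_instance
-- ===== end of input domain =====

-- B replaces A's cubic scan over index pairs (with a linear list-membership test inside) by a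
-- counter of squared values: one pass builds the counts, then pairs of DISTINCT square values are
-- combined multiplicatively (c_a*c_b, and C(c_a,2) for equal values) — objective: faster.

-- ===== PORT A =====
def pythagorean_triplets_count (arr : List Int) : Int :=
  let sq := arr.map (fun x => x ^ 2)
  (PySem.List.pyRange 0 (sq.length : Int)).foldl
    (fun count i =>
      (PySem.List.pyRange (i + 1) (sq.length : Int)).foldl
        (fun count j =>
          if sq.contains (PySem.List.pyGetD sq i 0 + PySem.List.pyGetD sq j 0) then count + 1
          else count)
        count)
    0

-- ===== PORT B =====
-- the 'while rest: a = rest.pop(0); …' loop of Source B, structural recursion on rest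
def pvGoB (cnt : PySem.Dict Int Int) : List Int → Int → Int
  | [], total => total
  | a :: rest, total =>
      let ca := cnt.getD a 0
      let total := if cnt.contains (a + a) then total + PySem.Int.floordiv (ca * (ca - 1)) 2 else total
      let total := rest.foldl (fun t b => if cnt.contains (a + b) then t + ca * cnt.getD b 0 else t) total
      pvGoB cnt rest total

def pythagorean_triplets_count_alt (arr : List Int) : Int :=
  let cnt := arr.foldl (fun d x => d.insert (x * x) (d.getD (x * x) 0 + 1)) PySem.Dict.empty
  pvGoB cnt cnt.keys 0

-- ===== PRECONDITION & SPEC =====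
def Spec_pythagorean_triplets_count (arr : List Int) (out : Int) : Prop := out = pythagorean_triplets_count_alt arr
instance (arr : List Int) (out : Int) : Decidable (Spec_pythagorean_triplets_count arr out) := by unfold Spec_pythagorean_triplets_count; infer_instance

-- ===== CLAIM (what is proved, stated in full; the proofs are below) =====
def Claim_equal_pythagorean_triplets_count : Prop := ∀ (arr : List Int), Dom_pythagorean_triplets_count arr → Spec_pythagorean_triplets_count arr (pythagorean_triplets_count arr)

-- ===== LEMMAS AND PROOFS =====

-- number of y in l with q x y (as an Int)
def pvRow (q : Int → Int → Bool) (x : Int) (l : List Int) : Int :=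
  (l.map (fun y => if q x y then (1 : Int) else 0)).sum

-- A's triangular count: sum over index pairs i < j of [q l_i l_j]
def pvF (q : Int → Int → Bool) : List Int → Int
  | [] => 0
  | x :: t => pvRow q x t + pvF q t

-- full ordered double sum and its diagonal
def pvT (q : Int → Int → Bool) (l : List Int) : Int := (l.map (fun x => pvRow q x l)).sum
def pvDg (q : Int → Int → Bool) (l : List Int) : Int :=
  (l.map (fun x => if q x x then (1 : Int) else 0)).sum

-- B's weighted versions over the distinct values, weight c
def pvRowW (q : Int → Int → Bool) (c : Int → Int) (a : Int) (l : List Int) : Int :=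
  (l.map (fun b => if q a b then c a * c b else 0)).sum
def pvFW (q : Int → Int → Bool) (c : Int → Int) : List Int → Int
  | [] => 0
  | a :: r => (if q a a then PySem.Int.floordiv (c a * (c a - 1)) 2 else 0) + pvRowW q c a r + pvFW q c r
def pvTW (q : Int → Int → Bool) (c : Int → Int) (l : List Int) : Int :=
  (l.map (fun a => pvRowW q c a l)).sum
def pvDW (q : Int → Int → Bool) (c : Int → Int) (l : List Int) : Int :=
  (l.map (fun a => if q a a then c a else 0)).sum

theorem pv_floordiv_two (m : Int) : 2 * PySem.Int.floordiv (m * (m - 1)) 2 = m * (m - 1) := by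
  obtain ⟨k, hk⟩ := Int.even_mul_succ_self (m - 1)
  have h : m * (m - 1) = 2 * k := by ring_nf; ring_nf at hk; omega
  simp [PySem.Int.floordiv, h, Int.mul_fdiv_cancel_left k (by norm_num : (2:Int) ≠ 0)]

theorem pv_two_F (q : Int → Int → Bool) (hq : ∀ x y, q x y = q y x) (l : List Int) :
    2 * pvF q l = pvT q l - pvDg q l := by
  induction l with
  | nil => simp [pvF, pvT, pvDg]
  | cons x t ih =>
      have hrow : ∀ z : Int,
          pvRow q z (x :: t) = (if q z x then (1:Int) else 0) + pvRow q z t := by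
        intro z; simp [pvRow]
      have hsym : (t.map (fun z => if q z x then (1:Int) else 0)).sum = pvRow q x t := by
        unfold pvRow; exact congrArg List.sum (List.map_congr_left (fun z _ => by rw [hq z x]))
      have hT : pvT q (x :: t) = (if q x x then (1:Int) else 0) + pvRow q x t + (pvRow q x t + pvT q t) := by
        unfold pvT
        simp only [List.map_cons, List.sum_cons, hrow]
        rw [PySem.List.sum_map_add_int, hsym]
      have hD : pvDg q (x :: t) = (if q x x then (1:Int) else 0) + pvDg q t := by
        simp [pvDg]
      simp only [pvF, hT, hD]
      omega

theorem pv_two_FW (q : Int → Int → Bool) (c : Int → Int) (hq : ∀ x y, q x y = q y x) (l : List Int) :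
    2 * pvFW q c l = pvTW q c l - pvDW q c l := by
  induction l with
  | nil => simp [pvFW, pvTW, pvDW]
  | cons a r ih =>
      have hrow : ∀ z : Int,
          pvRowW q c z (a :: r) = (if q z a then c z * c a else 0) + pvRowW q c z r := by
        intro z; simp [pvRowW]
      have hsym : (r.map (fun z => if q z a then c z * c a else 0)).sum = pvRowW q c a r := by
        unfold pvRowW
        exact congrArg List.sum (List.map_congr_left (fun z _ => by rw [hq z a, mul_comm]))
      have hT : pvTW q c (a :: r) = (if q a a then c a * c a else 0) + pvRowW q c a r +
          (pvRowW q c a r + pvTW q c r) := by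
        unfold pvTW
        simp only [List.map_cons, List.sum_cons, hrow]
        rw [PySem.List.sum_map_add_int, hsym]
      have hD : pvDW q c (a :: r) = (if q a a then c a else 0) + pvDW q c r := by
        simp [pvDW]
      have hdiag : 2 * (if q a a then PySem.Int.floordiv (c a * (c a - 1)) 2 else 0)
          = (if q a a then c a * c a else 0) - (if q a a then c a else 0) := by
        split_ifs with h
        · rw [pv_floordiv_two]; ring
        · ring
      simp only [pvFW, hT, hD]
      omega

theorem pv_discard_sum (s : List Int) (hs : s.Nodup) (x : Int) (f : Int → Int) :
    ((PySem.Set.discard s x).map f).sum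
      = (s.map f).sum - (if x ∈ s then f x else 0) := by
  by_cases hx : x ∈ s
  · have herase : s.erase x = PySem.Set.discard s x := by
      rw [List.Nodup.erase_eq_filter hs]
      rfl
    have hperm : List.Perm s (x :: s.erase x) := List.perm_cons_erase hx
    have hsum := (hperm.map f).sum_eq
    rw [herase] at hsum
    simp only [List.map_cons, List.sum_cons] at hsum
    rw [if_pos hx]
    omega
  · have hdis : PySem.Set.discard s x = s := by
      simp only [PySem.Set.discard]
      apply List.filter_eq_self.mpr
      intro y hy
      simp only [Bool.not_eq_true', beq_eq_false_iff_ne, ne_eq]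
      exact fun h => hx (h ▸ hy)
    rw [hdis, if_neg hx]
    omega

theorem pv_count_sum (l : List Int) (h : Int → Int) :
    ((PySem.Set.ofList l).map (fun a => (l.count a : Int) * h a)).sum = (l.map h).sum := by
  induction l with
  | nil => simp [PySem.Set.ofList_nil]
  | cons x t ih =>
      rw [PySem.Set.ofList_cons]
      simp only [List.map_cons, List.sum_cons]
      have hnd : (PySem.Set.ofList t).Nodup := PySem.Set.nodup_ofList t
      have hcx : ((x :: t).count x : Int) = (t.count x : Int) + 1 := by
        simp
      have hdrop :
          ((PySem.Set.discard (PySem.Set.ofList t) x).map (fun a => ((x :: t).count a : Int) * h a)).sum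
            = ((PySem.Set.discard (PySem.Set.ofList t) x).map (fun a => (t.count a : Int) * h a)).sum := by
        apply congrArg List.sum
        apply List.map_congr_left
        intro a ha
        have hax : a ≠ x := ((PySem.Set.mem_discard _ _ _).mp ha).2
        have hcnt : (x :: t).count a = t.count a := by
          simp [Ne.symm hax]
        rw [hcnt]
      rw [hdrop, pv_discard_sum _ hnd x (fun a => (t.count a : Int) * h a), ih, hcx]
      simp only [PySem.Set.mem_ofList]
      by_cases hx : x ∈ t
      · rw [if_pos hx]
        ring
      · have hc0 : t.count x = 0 := List.count_eq_zero.mpr hx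
        rw [if_neg hx, hc0]
        push_cast
        ring

-- the inner 'for b in rest' loop of B
theorem pv_foldl_if_add (l : List Int) (p : Int → Bool) (g : Int → Int) (t0 : Int) :
    l.foldl (fun t b => if p b then t + g b else t) t0
      = t0 + (l.map (fun b => if p b then g b else 0)).sum := by
  induction l generalizing t0 with
  | nil => simp
  | cons b r ih =>
      simp only [List.foldl_cons, List.map_cons, List.sum_cons, ih]
      split_ifs with hb
      · ring
      · ring

-- B's loop computes pvFW over the key list
theorem pv_goB_eq (sq : List Int) (rest : List Int) (total : Int) :
    pvGoB (PySem.Dict.counter sq) rest total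
      = total + pvFW (fun x y => sq.contains (x + y)) (fun a => (sq.count a : Int)) rest := by
  induction rest generalizing total with
  | nil => simp [pvGoB, pvFW]
  | cons a r ih =>
      simp only [pvGoB, pvFW, PySem.Dict.contains_counter, PySem.Dict.getD_counter]
      rw [pv_foldl_if_add, ih]
      unfold pvRowW
      split_ifs with ha
      · ring
      · ring

-- countP as a 0/1 sum
theorem pv_countP_row (q : Int → Int → Bool) (x : Int) (t : List Int) :
    (t.countP (q x) : Int) = pvRow q x t := by
  unfold pvRow
  induction t with
  | nil => simp
  | cons y s ihs =>
      simp only [List.countP_cons, List.map_cons, List.sum_cons]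
      push_cast
      rw [← ihs]
      by_cases hb : q x y
      · simp [hb]; ring
      · simp [hb]

-- the index-pair sum over range equals the structural pair count
theorem pv_range_F (q : Int → Int → Bool) (l : List Int) :
    ((List.range l.length).map
        (fun k => ((l.drop (k + 1)).countP (q (l.getD k 0)) : Int))).sum = pvF q l := by
  induction l with
  | nil => simp [pvF]
  | cons x t ih =>
      simp only [List.length_cons, List.range_succ_eq_map, List.map_cons, List.sum_cons,
        List.map_map, Function.comp_def, Nat.succ_eq_add_one]
      have hrest : ((List.range t.length).map
            (fun k => (((x :: t).drop (k + 1 + 1)).countP (q ((x :: t).getD (k + 1) 0)) : Int))).sum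
          = pvF q t := by
        rw [← ih]
        apply congrArg List.sum
        apply List.map_congr_left
        intro k _
        simp [List.getD]
      simp only [List.drop_succ_cons, List.drop_zero, List.getD_cons_zero, List.getD_cons_succ] at hrest ⊢
      rw [hrest, pv_countP_row]
      simp [pvF]

-- A's nested loops over index ranges compute pvF
theorem pv_A_loop (sq : List Int) :
    (PySem.List.pyRange 0 (sq.length : Int)).foldl
      (fun count i =>
        (PySem.List.pyRange (i + 1) (sq.length : Int)).foldl
          (fun count j =>
            if sq.contains (PySem.List.pyGetD sq i 0 + PySem.List.pyGetD sq j 0) then count + 1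
            else count)
          count) 0
    = pvF (fun x y => sq.contains (x + y)) sq := by
  have hinner : ∀ (c i : Int), 0 ≤ i →
      (PySem.List.pyRange (i + 1) (sq.length : Int)).foldl
        (fun count j =>
          if sq.contains (PySem.List.pyGetD sq i 0 + PySem.List.pyGetD sq j 0) then count + 1
          else count) c
      = c + ((sq.drop (i + 1).toNat).countP
          (fun y => sq.contains (PySem.List.pyGetD sq i 0 + y)) : Int) := by
    intro c i hi
    have hlen : (sq.length : Int) = PySem.List.len sq := by simp [PySem.List.len]
    rw [hlen, PySem.List.foldl_pyRange_pyGetD sq 0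
      (fun count y => if sq.contains (PySem.List.pyGetD sq i 0 + y) then count + 1 else count) c
      (by omega : (0:Int) ≤ i + 1)]
    exact PySem.List.foldl_if_add_one _ _ _
  rw [PySem.List.pyRange_one 0 (sq.length : Int)]
  simp only [sub_zero, Int.toNat_natCast]
  rw [List.foldl_map]
  rw [PySem.List.foldl_congr_mem _ _
    (fun (c : Int) (k : Nat) => c + ((sq.drop (k + 1)).countP
        (fun y => sq.contains (sq.getD k 0 + y)) : Int)) 0
    (by
      intro c k _
      simp only [zero_add]
      rw [hinner c (↑k) (Int.natCast_nonneg k)]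
      have h1 : ((k:Int) + 1).toNat = k + 1 := by omega
      rw [h1, PySem.List.pyGetD_natCast])]
  rw [PySem.List.foldl_add (List.range sq.length)
    (fun k : Nat => ((sq.drop (k + 1)).countP (fun y => sq.contains (sq.getD k 0 + y)) : Int)) 0]
  rw [zero_add]
  exact pv_range_F (fun x y => sq.contains (x + y)) sq

theorem pv_A_char (arr : List Int) :
    pythagorean_triplets_count arr
      = pvF (fun x y => (arr.map (fun x => x ^ 2)).contains (x + y)) (arr.map (fun x => x ^ 2)) :=
  pv_A_loop (arr.map (fun x => x ^ 2))

theorem pv_B_char (arr : List Int) :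
    pythagorean_triplets_count_alt arr
      = pvFW (fun x y => (arr.map (fun x => x ^ 2)).contains (x + y))
          (fun a => ((arr.map (fun x => x ^ 2)).count a : Int))
          (PySem.Set.ofList (arr.map (fun x => x ^ 2))) := by
  have hmap : arr.map (fun x => x * x) = arr.map (fun x => x ^ 2) := by
    apply List.map_congr_left; intro x _; ring
  have hcnt : arr.foldl (fun d x => d.insert (x * x) (d.getD (x * x) 0 + 1)) PySem.Dict.empty
      = PySem.Dict.counter (arr.map (fun x => x ^ 2)) := by
    rw [← PySem.Dict.foldl_insert_getD_add_one_eq_counter, ← hmap, List.foldl_map]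
  have h0 : pythagorean_triplets_count_alt arr
      = pvGoB (PySem.Dict.counter (arr.map (fun x => x ^ 2)))
          (PySem.Dict.counter (arr.map (fun x => x ^ 2))).keys 0 := by
    simp only [pythagorean_triplets_count_alt, hcnt]
  rw [h0, PySem.Dict.keys_counter, pv_goB_eq]
  ring

-- transfer B's weighted sums over the distinct values to plain sums over the list
theorem pv_TW_eq (q : Int → Int → Bool) (l : List Int) :
    pvTW q (fun a => (l.count a : Int)) (PySem.Set.ofList l) = pvT q l := by
  unfold pvTW pvT
  have hrow : ∀ a : Int, pvRowW q (fun a => (l.count a : Int)) a (PySem.Set.ofList l)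
      = (l.count a : Int) * pvRow q a l := by
    intro a
    unfold pvRowW
    have h1 : ∀ b : Int, (if q a b then (l.count a : Int) * (l.count b : Int) else 0)
        = (l.count b : Int) * (if q a b then (l.count a : Int) else 0) := by
      intro b; split_ifs <;> ring
    rw [List.map_congr_left (fun b _ => h1 b),
      pv_count_sum l (fun b => if q a b then (l.count a : Int) else 0)]
    have h2 : ∀ y : Int, (if q a y then (l.count a : Int) else 0)
        = (l.count a : Int) * (if q a y then (1:Int) else 0) := by
      intro y; split_ifs <;> ring
    rw [List.map_congr_left (fun y _ => h2 y), List.sum_map_mul_left]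
    rfl
  rw [List.map_congr_left (fun a _ => hrow a)]
  exact pv_count_sum l (fun a => pvRow q a l)

theorem pv_DW_eq (q : Int → Int → Bool) (l : List Int) :
    pvDW q (fun a => (l.count a : Int)) (PySem.Set.ofList l) = pvDg q l := by
  unfold pvDW pvDg
  have h1 : ∀ a : Int, (if q a a then (l.count a : Int) else 0)
      = (l.count a : Int) * (if q a a then (1:Int) else 0) := by
    intro a; split_ifs <;> ring
  rw [List.map_congr_left (fun a _ => h1 a)]
  exact pv_count_sum l (fun a => if q a a then (1:Int) else 0)

-- ===== VERDICT (by name: the statement is the Claim_ definition above) =====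
theorem pythagorean_triplets_count_spec : Claim_equal_pythagorean_triplets_count := by
  intro arr _
  unfold Spec_pythagorean_triplets_count
  have hq : ∀ x y : Int, (fun x y => (arr.map (fun x => x ^ 2)).contains (x + y)) x y
      = (fun x y => (arr.map (fun x => x ^ 2)).contains (x + y)) y x := by
    intro x y; simp only []; rw [Int.add_comm]
  have h1 := pv_two_F (fun x y => (arr.map (fun x => x ^ 2)).contains (x + y)) hq
    (arr.map (fun x => x ^ 2))
  have h2 := pv_two_FW (fun x y => (arr.map (fun x => x ^ 2)).contains (x + y))
    (fun a => ((arr.map (fun x => x ^ 2)).count a : Int)) hq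
    (PySem.Set.ofList (arr.map (fun x => x ^ 2)))
  rw [pv_TW_eq, pv_DW_eq] at h2
  rw [pv_A_char, pv_B_char]
  omega
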